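-- pv_equiv track=rewrite | github.com/ormastes/simple | src/compiler_core_win/fix_cpp.py | count_braces
-- ===== SOURCE A (Python) =====
-- def count_braces(line):
--     """Count net braces { - } in a line, ignoring braces inside string literals and comments."""
--     count = 0
--     in_string = False
--     in_char = False
--     in_line_comment = False
--     in_block_comment = False
--     escape = False
--     i = 0
--     while i < len(line):
--         c = line[i]
--         if escape:
--             escape = False
--             i += 1
--             continue
--         if c == '\\' and (in_string or in_char):
--             escape = True
--             i += 1
--             continue
--         if in_line_comment:
--             i += 1
--             continue
--         if in_block_comment:
--             if c == '*' and i + 1 < len(line) and line[i+1] == '/':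
--                 in_block_comment = False
--                 i += 2
--                 continue
--             i += 1
--             continue
--         if c == '/' and i + 1 < len(line):
--             if line[i+1] == '/':
--                 in_line_comment = True
--                 i += 2
--                 continue
--             if line[i+1] == '*':
--                 in_block_comment = True
--                 i += 2
--                 continue
--         if c == '"' and not in_char:
--             in_string = not in_string
--             i += 1
--             continue
--         if c == "'" and not in_string:
--             in_char = not in_char
--             i += 1
--             continue
--         if not in_string and not in_char:
--             if c == '{':
--                 count += 1
--             elif c == '}':
--                 count -= 1
--         i += 1
--     return count
-- ===== SOURCE B (Python) =====
-- # Forward single-pass state machine over the characters: an explicit mode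
-- # (NORMAL / SAW_SLASH / LINE_COMMENT / BLOCK_COMMENT / BLOCK_SAW_STAR) plus an
-- # escape flag, no index arithmetic and no lookahead.
-- NORMAL, SAW_SLASH, LINE_COMMENT, BLOCK_COMMENT, BLOCK_SAW_STAR = 0, 1, 2, 3, 4
--
--
-- def _normal(c, count, in_string, in_char):
--     """Process c in NORMAL mode; returns the new (count, mode, in_string, in_char, escape)."""
--     if c == '\\' and (in_string or in_char):
--         return (count, NORMAL, in_string, in_char, True)
--     if c == '/':
--         return (count, SAW_SLASH, in_string, in_char, False)
--     if c == '"' and not in_char: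
--         return (count, NORMAL, not in_string, in_char, False)
--     if c == "'" and not in_string:
--         return (count, NORMAL, in_string, not in_char, False)
--     if not in_string and not in_char:
--         if c == '{':
--             count += 1
--         elif c == '}':
--             count -= 1
--     return (count, NORMAL, in_string, in_char, False)
--
--
-- def _step(state, c):
--     count, mode, in_string, in_char, escape = state
--     if escape:
--         return (count, mode, in_string, in_char, False)
--     if mode == LINE_COMMENT:
--         return state
--     if mode == SAW_SLASH:
--         if c == '/':
--             return (count, LINE_COMMENT, in_string, in_char, False)
--         if c == '*':
--             return (count, BLOCK_COMMENT, in_string, in_char, False)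
--         return _normal(c, count, in_string, in_char)
--     if mode == BLOCK_SAW_STAR:
--         if c == '/':
--             return (count, NORMAL, in_string, in_char, False)
--         if c == '*':
--             return state
--         if c == '\\' and (in_string or in_char):
--             return (count, BLOCK_COMMENT, in_string, in_char, True)
--         return (count, BLOCK_COMMENT, in_string, in_char, False)
--     if mode == BLOCK_COMMENT:
--         if c == '\\' and (in_string or in_char):
--             return (count, BLOCK_COMMENT, in_string, in_char, True)
--         if c == '*':
--             return (count, BLOCK_SAW_STAR, in_string, in_char, False)
--         return state
--     return _normal(c, count, in_string, in_char)
--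
--
-- def count_braces(line):
--     """Count net braces { - } in a line, ignoring braces inside string literals and comments."""
--     state = (0, NORMAL, False, False, False)
--     for c in line:
--         state = _step(state, c)
--     return state[0]
-- ===== Notes on version B (the rewrite author's own statement) =====
-- stated objective: alternative
-- what changed: Replaces A's index-based while-loop with `line[i+1]` lookahead and four boolean comment flags by a single forward fold over the characters driven by an explicit five-mode state machine (NORMAL/SAW_SLASH/LINE_COMMENT/BLOCK_COMMENT/BLOCK_SAW_STAR), eliminating all index arithmetic and lookahead.
import Mathlib
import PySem

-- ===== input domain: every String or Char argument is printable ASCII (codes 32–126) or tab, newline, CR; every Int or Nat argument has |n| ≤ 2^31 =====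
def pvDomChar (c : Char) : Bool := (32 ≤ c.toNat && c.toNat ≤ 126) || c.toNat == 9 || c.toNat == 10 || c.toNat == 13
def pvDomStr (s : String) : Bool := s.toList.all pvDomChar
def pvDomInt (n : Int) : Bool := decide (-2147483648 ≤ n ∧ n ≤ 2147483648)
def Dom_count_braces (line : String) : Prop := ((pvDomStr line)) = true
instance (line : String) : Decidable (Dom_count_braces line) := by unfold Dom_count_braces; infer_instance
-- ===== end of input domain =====

-- B replaces A's index/lookahead while-loop by a single forward fold with an explicit
-- mode (NORMAL/SAW_SLASH/LINE/BLOCK/BLOCK_SAW_STAR) and escape flag (objective: alternative).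

-- ===== PORT A =====
-- A's while-loop over index i: recursion on the remaining characters; the
-- `line[i+1]` lookaheads become matches on the tail, `i += 2` drops two chars.
def goA : List Char → Int → Bool → Bool → Bool → Bool → Bool → Int
  | [], count, _, _, _, _, _ => count
  | c :: rest, count, instr, inch, inlc, inbc, esc =>
    if esc then goA rest count instr inch inlc inbc false
    else if c == '\\' && (instr || inch) then goA rest count instr inch inlc inbc true
    else if inlc then goA rest count instr inch inlc inbc false
    else if inbc then
      if c == '*' then
        match rest with
        | '/' :: r2 => goA r2 count instr inch inlc false false
        | r => goA r count instr inch inlc inbc false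
      else goA rest count instr inch inlc inbc false
    else if c == '/' && !rest.isEmpty then
      match rest with
      | '/' :: r2 => goA r2 count instr inch true inbc false
      | '*' :: r2 => goA r2 count instr inch inlc true false
      | r =>
        -- lookahead is neither '/' nor '*': fall through to the later checks,
        -- none of which fire for c = '/'
        goA r count instr inch inlc inbc false
    else if c == '"' && !inch then goA rest count (!instr) inch inlc inbc false
    else if c == '\'' && !instr then goA rest count instr (!inch) inlc inbc false
    else if !instr && !inch then
      if c == '{' then goA rest (count + 1) instr inch inlc inbc false
      else if c == '}' then goA rest (count - 1) instr inch inlc inbc false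
      else goA rest count instr inch inlc inbc false
    else goA rest count instr inch inlc inbc false
termination_by cs _ _ _ _ _ _ => cs.length
decreasing_by all_goals simp_all [List.length_cons]

def count_braces (line : String) : Int :=
  goA line.toList 0 false false false false false

-- ===== PORT B =====
-- modes: 0 = NORMAL, 1 = SAW_SLASH, 2 = LINE_COMMENT, 3 = BLOCK_COMMENT, 4 = BLOCK_SAW_STAR
def stepNormal (c : Char) (count : Int) (instr inch : Bool) : Int × Nat × Bool × Bool × Bool :=
  if c == '\\' && (instr || inch) then (count, 0, instr, inch, true)
  else if c == '/' then (count, 1, instr, inch, false)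
  else if c == '"' && !inch then (count, 0, !instr, inch, false)
  else if c == '\'' && !instr then (count, 0, instr, !inch, false)
  else if !instr && !inch then
    ((if c == '{' then count + 1 else if c == '}' then count - 1 else count), 0, instr, inch, false)
  else (count, 0, instr, inch, false)

def stepB : Int × Nat × Bool × Bool × Bool → Char → Int × Nat × Bool × Bool × Bool
  | st@(count, mode, instr, inch, esc), c =>
  if esc then (count, mode, instr, inch, false)
  else if mode == 2 then st
  else if mode == 1 then
    if c == '/' then (count, 2, instr, inch, false)
    else if c == '*' then (count, 3, instr, inch, false)
    else stepNormal c count instr inch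
  else if mode == 4 then
    if c == '/' then (count, 0, instr, inch, false)
    else if c == '*' then st
    else if c == '\\' && (instr || inch) then (count, 3, instr, inch, true)
    else (count, 3, instr, inch, false)
  else if mode == 3 then
    if c == '\\' && (instr || inch) then (count, 3, instr, inch, true)
    else if c == '*' then (count, 4, instr, inch, false)
    else st
  else stepNormal c count instr inch

def count_braces_alt (line : String) : Int :=
  (line.toList.foldl stepB (0, 0, false, false, false)).1

-- ===== PRECONDITION & SPEC =====
def Spec_count_braces (line : String) (out : Int) : Prop := out = count_braces_alt line
instance (line : String) (out : Int) : Decidable (Spec_count_braces line out) := by unfold Spec_count_braces; infer_instance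

-- ===== CLAIM (what is proved, stated in full; the proofs are below) =====
def Claim_equal_count_braces : Prop := ∀ (line : String), Dom_count_braces line → Spec_count_braces line (count_braces line)

-- ===== LEMMAS AND PROOFS =====

lemma goA_nil (count : Int) (instr inch inlc inbc esc : Bool) :
    goA [] count instr inch inlc inbc esc = count := by
  rw [goA.eq_def]

-- once A is in a line comment it only skips characters and returns count
lemma lineA (cs : List Char) : ∀ (count : Int) (instr inch ibc esc : Bool),
    goA cs count instr inch true ibc esc = count := by
  induction cs with
  | nil => intro _ _ _ _ _; exact goA_nil ..
  | cons c rest ih =>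
    intro count instr inch ibc esc
    rw [goA.eq_def]
    dsimp only
    split_ifs <;> first
      | apply ih
      | simp_all
      | (rename_i hF _; exact absurd rfl hF)

-- once B is in LINE_COMMENT mode the count never changes
lemma lineB (cs : List Char) : ∀ (count : Int) (instr inch esc : Bool),
    (List.foldl stepB (count, 2, instr, inch, esc) cs).1 = count := by
  induction cs with
  | nil => intro _ _ _ _; rfl
  | cons c rest ih =>
    intro count instr inch esc
    cases esc <;> simp [List.foldl, stepB, stepNormal, ih]

-- main bisimulation: the four mode-correspondences, proved simultaneously
lemma simAB (cs : List Char) :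
    (∀ (count : Int) (instr inch esc : Bool),
      goA cs count instr inch false false esc
        = (List.foldl stepB (count, 0, instr, inch, esc) cs).1)
  ∧ (∀ (count : Int) (instr inch esc : Bool),
      goA cs count instr inch false true esc
        = (List.foldl stepB (count, 3, instr, inch, esc) cs).1)
  ∧ (∀ (count : Int) (instr inch : Bool),
      goA ('/' :: cs) count instr inch false false false
        = (List.foldl stepB (count, 1, instr, inch, false) cs).1)
  ∧ (∀ (count : Int) (instr inch : Bool),
      goA ('*' :: cs) count instr inch false true false
        = (List.foldl stepB (count, 4, instr, inch, false) cs).1) := by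
  induction cs with
  | nil =>
    refine ⟨fun c i h e => ?_, fun c i h e => ?_, fun c i h => ?_, fun c i h => ?_⟩
    · simp [goA_nil, List.foldl]
    · simp [goA_nil, List.foldl]
    · rw [goA.eq_def]
      simp [goA_nil, stepB, stepNormal, List.foldl]
    · rw [goA.eq_def]
      simp [goA_nil, stepB, List.foldl]
  | cons d rest ih =>
    obtain ⟨ih0, ih3, ih1, ih4⟩ := ih
    have hnorm : ∀ (count : Int) (instr inch esc : Bool),
        goA (d :: rest) count instr inch false false esc
          = (List.foldl stepB (count, 0, instr, inch, esc) (d :: rest)).1 := by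
      intro count instr inch esc
      cases esc with
      | true => rw [goA.eq_def]; simp [List.foldl, stepB, stepNormal, ih0]
      | false =>
        by_cases hb : (d == '\\' && (instr || inch)) = true
        · rw [goA.eq_def]; simp [List.foldl, stepB, stepNormal, hb, ih0]
        · by_cases hs : d = '/'
          · subst hs
            rw [ih1 count instr inch]
            simp [List.foldl, stepB, stepNormal, hb]
          · rw [goA.eq_def]
            simp [List.foldl, stepB, stepNormal, hb, hs, ih0]
            split_ifs <;> rfl
    have hblock : ∀ (count : Int) (instr inch esc : Bool),
        goA (d :: rest) count instr inch false true esc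
          = (List.foldl stepB (count, 3, instr, inch, esc) (d :: rest)).1 := by
      intro count instr inch esc
      cases esc with
      | true => rw [goA.eq_def]; simp [List.foldl, stepB, stepNormal, ih3]
      | false =>
        by_cases hb : (d == '\\' && (instr || inch)) = true
        · rw [goA.eq_def]; simp [List.foldl, stepB, stepNormal, hb, ih3]
        · by_cases hstar : d = '*'
          · subst hstar
            rw [ih4 count instr inch]
            simp [List.foldl, stepB, stepNormal, hb]
          · rw [goA.eq_def]
            simp [List.foldl, stepB, stepNormal, hb, hstar, ih3]
    refine ⟨hnorm, hblock, ?_, ?_⟩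
    · -- SAW_SLASH: '/' pending before this character
      intro count instr inch
      by_cases hd : d = '/'
      · subst hd
        rw [goA.eq_def]
        simp [List.foldl, stepB, stepNormal, lineA, lineB]
      · by_cases hd2 : d = '*'
        · subst hd2
          rw [goA.eq_def]
          simp [List.foldl, stepB, stepNormal, ih3]
        · have lhs : goA ('/' :: d :: rest) count instr inch false false false
              = goA (d :: rest) count instr inch false false false := by
            rw [goA.eq_def]
            simp [hd, hd2]
          rw [lhs, hnorm]
          simp [List.foldl, stepB, stepNormal, hd, hd2]
    · -- BLOCK_SAW_STAR: '*' pending inside a block comment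
      intro count instr inch
      by_cases hd : d = '/'
      · subst hd
        rw [goA.eq_def]
        simp [List.foldl, stepB, stepNormal, ih0]
      · have lhs : goA ('*' :: d :: rest) count instr inch false true false
            = goA (d :: rest) count instr inch false true false := by
          rw [goA.eq_def]
          simp [hd]
        rw [lhs, hblock]
        by_cases hb : (d == '\\' && (instr || inch)) = true
        · simp [List.foldl, stepB, stepNormal, hd, hb]
          split_ifs <;> simp_all
        · by_cases hs : d = '*'
          · subst hs; simp [List.foldl, stepB, stepNormal, hd]
          · simp [List.foldl, stepB, stepNormal, hd, hb, hs]

-- ===== VERDICT (by name: the statement is the Claim_ definition above) =====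
theorem count_braces_spec : Claim_equal_count_braces := by
  intro line _
  unfold Spec_count_braces count_braces count_braces_alt
  exact (simAB line.toList).1 0 false false false
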